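-- pv_equiv track=rewrite | github.com/bc36/leetcode | lc_Python/lc2600_2699.py | findPrefixScore
-- ===== SOURCE A (Python) =====
-- from typing import List, Optional, Tuple
--
-- def findPrefixScore(nums: List[int]) -> List[int]:
--     ans = []
--     mx = summ = 0
--     for v in nums:
--         mx = max(mx, v)
--         summ += v + mx
--         ans.append(summ)
--     return ans
-- ===== SOURCE B (Python) =====
-- from typing import List
--
-- def findPrefixScore(nums: List[int]) -> List[int]:
--     # Run-length-encode the running max (floored at 0) into (run, value) blocks.
--     blocks = []
--     cur = 0
--     run = 0
--     for v in nums: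
--         if v > cur:
--             if run:
--                 blocks.append((run, cur))
--             cur, run = v, 1
--         else:
--             run += 1
--     blocks.append((run, cur))
--     # Expand each block's cumulative-max contribution by closed form.
--     mxsum = []
--     acc = 0
--     for span, val in blocks:
--         mxsum.extend(acc + val * k for k in range(1, span + 1))
--         acc += val * span
--     # Add the running sum of nums itself.
--     out = []
--     s = 0
--     for v, m in zip(nums, mxsum):
--         s += v
--         out.append(s + m)
--     return out
-- ===== Notes on version B (the rewrite author's own statement) =====
-- stated objective: alternative
-- what changed: Instead of A's single fused loop maintaining (mx, summ), B run-length-encodes the running max (floored at 0) into (length, value) blocks, expands each block's cumulative-max contribution with the closed form acc + val*k (multiplication instead of repeated max/add), and finally adds the separately accumulated running sum of nums.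
import Mathlib
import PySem

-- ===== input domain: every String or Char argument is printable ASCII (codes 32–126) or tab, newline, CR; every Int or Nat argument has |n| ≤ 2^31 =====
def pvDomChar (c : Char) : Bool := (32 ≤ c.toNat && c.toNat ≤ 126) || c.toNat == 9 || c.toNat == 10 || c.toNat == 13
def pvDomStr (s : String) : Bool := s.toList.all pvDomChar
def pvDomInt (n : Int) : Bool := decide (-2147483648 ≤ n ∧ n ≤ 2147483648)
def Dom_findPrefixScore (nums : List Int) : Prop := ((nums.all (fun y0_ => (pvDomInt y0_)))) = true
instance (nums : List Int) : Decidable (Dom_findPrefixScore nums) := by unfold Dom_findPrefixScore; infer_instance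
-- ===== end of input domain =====

-- B replaces A's fused loop by a different algorithm: run-length-encode the running max (floored at 0) into blocks, expand each block's cumulative contribution by the closed form acc + val*k, then add the running sum of nums; same O(n) cost, alternative algorithm.


-- ===== PORT A =====
-- A: one fused loop keeping mx, summ and appending summ to ans.
def findPrefixScore (nums : List Int) : List Int :=
  (nums.foldl
    (fun (st : Int × Int × List Int) v =>
      let mx := max st.1 v
      let summ := st.2.1 + v + mx
      (mx, summ, st.2.2 ++ [summ]))
    (0, 0, [])).2.2

-- ===== PORT B =====
-- B step 1: run-length-encode the running max into (run, value) blocks; state (blocks, cur, run)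
def pvBlockStep (st : List (Int × Int) × Int × Int) (v : Int) : List (Int × Int) × Int × Int :=
  if v > st.2.1 then
    ((if st.2.2 ≠ 0 then st.1 ++ [(st.2.2, st.2.1)] else st.1), v, 1)
  else
    (st.1, st.2.1, st.2.2 + 1)

-- B step 2: expand one block's contribution by closed form; state (mxsum, acc)
def pvExpandStep (st : List Int × Int) (sv : Int × Int) : List Int × Int :=
  (st.1 ++ (PySem.List.pyRange 1 (sv.1 + 1) 1).map (fun k => st.2 + sv.2 * k),
   st.2 + sv.2 * sv.1)

-- B step 3: add the running sum of nums; state (out, s)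
def pvOutStep (st : List Int × Int) (vm : Int × Int) : List Int × Int :=
  let s := st.2 + vm.1
  (st.1 ++ [s + vm.2], s)

def findPrefixScore_alt (nums : List Int) : List Int :=
  let st := nums.foldl pvBlockStep ([], 0, 0)
  let blocks := st.1 ++ [(st.2.2, st.2.1)]
  let mxsum := (blocks.foldl pvExpandStep ([], 0)).1
  ((List.zip nums mxsum).foldl pvOutStep ([], 0)).1

-- ===== PRECONDITION & SPEC =====
def Spec_findPrefixScore (nums : List Int) (out : List Int) : Prop := out = findPrefixScore_alt nums
instance (nums : List Int) (out : List Int) : Decidable (Spec_findPrefixScore nums out) := by unfold Spec_findPrefixScore; infer_instance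

-- ===== CLAIM (what is proved, stated in full; the proofs are below) =====
def Claim_equal_findPrefixScore : Prop := ∀ (nums : List Int), Dom_findPrefixScore nums → Spec_findPrefixScore nums (findPrefixScore nums)

-- ===== LEMMAS AND PROOFS =====
-- reference scans (proof-only helpers)
def scanMaxFrom (m : Int) : List Int → List Int
  | [] => []
  | v :: t => let m' := max m v; m' :: scanMaxFrom m' t

def scanAddFrom (s : Int) : List Int → List Int
  | [] => []
  | x :: t => let s' := s + x; s' :: scanAddFrom s' t

def flatB (bl : List (Int × Int)) : List Int :=
  bl.flatMap (fun sv => List.replicate sv.1.toNat sv.2)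

theorem scanAddFrom_append (s : Int) (a b : List Int) :
    scanAddFrom s (a ++ b) = scanAddFrom s a ++ scanAddFrom (s + a.sum) b := by
  induction a generalizing s with
  | nil => simp [scanAddFrom]
  | cons x t ih => simp [scanAddFrom, ih, add_assoc]

theorem expand_range_eq (n : Nat) (acc val : Int) :
    (PySem.List.pyRange 1 ((n : Int) + 1) 1).map (fun k => acc + val * k)
      = scanAddFrom acc (List.replicate n val) := by
  induction n generalizing acc with
  | zero => simp [PySem.List.pyRange_one_eq_nil, scanAddFrom]
  | succ m ih =>
    have h1 : ((m : Int) + 1 + 1) = ((m : Int) + 1) + 1 := by ring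
    have h2 : (1 : Int) ≤ (m : Int) + 1 := by omega
    rw [show ((m + 1 : Nat) : Int) + 1 = ((m : Int) + 1) + 1 by push_cast; ring,
        PySem.List.pyRange_one_succ_right h2, List.map_append, ih]
    have hrep : List.replicate (m + 1) val = List.replicate m val ++ [val] := by
      simp [List.replicate_succ']
    rw [hrep, scanAddFrom_append]
    simp [scanAddFrom, List.sum_replicate]
    ring

theorem expand_eq (bl : List (Int × Int)) :
    ∀ (init : List Int) (acc : Int), (∀ p ∈ bl, 0 ≤ p.1) →
    (bl.foldl pvExpandStep (init, acc)).1 = init ++ scanAddFrom acc (flatB bl) := by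
  induction bl with
  | nil => intro init acc _; simp [flatB, scanAddFrom]
  | cons sv t ih =>
    intro init acc h
    have hsv : 0 ≤ sv.1 := h sv (by simp)
    have hcast : sv.1 = ((sv.1.toNat : Nat) : Int) := (Int.toNat_of_nonneg hsv).symm
    simp only [List.foldl_cons, flatB, List.flatMap_cons]
    rw [ih _ _ (fun p hp => h p (by simp [hp]))]
    show init ++ (PySem.List.pyRange 1 (sv.1 + 1) 1).map (fun k => acc + sv.2 * k)
        ++ scanAddFrom (acc + sv.2 * sv.1) _ = _
    rw [hcast, expand_range_eq, scanAddFrom_append]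
    simp [List.sum_replicate, flatB]
    rw [max_eq_left hsv]
    ring_nf

theorem blocks_nonneg (t : List Int) :
    ∀ (bl : List (Int × Int)) (cur run : Int), (∀ p ∈ bl, 0 ≤ p.1) → 0 ≤ run →
    (∀ p ∈ (t.foldl pvBlockStep (bl, cur, run)).1, 0 ≤ p.1) ∧
      0 ≤ (t.foldl pvBlockStep (bl, cur, run)).2.2 := by
  induction t with
  | nil => intro bl cur run hb hr; exact ⟨hb, hr⟩
  | cons v s ih =>
    intro bl cur run hb hr
    simp only [List.foldl_cons, pvBlockStep]
    by_cases h1 : v > cur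
    · simp only [if_pos h1]
      by_cases h2 : run ≠ 0
      · simp only [if_pos h2]
        apply ih
        · intro p hp
          rcases List.mem_append.1 hp with h | h
          · exact hb p h
          · simp only [List.mem_singleton] at h
            subst h
            exact hr
        · omega
      · simp only [if_neg h2]
        exact ih _ _ _ hb (by omega)
    · simp only [if_neg h1]
      exact ih _ _ _ hb (by omega)

theorem blocks_flat (t : List Int) :
    ∀ (bl : List (Int × Int)) (cur run : Int), 0 ≤ run →
    flatB ((t.foldl pvBlockStep (bl, cur, run)).1
            ++ [((t.foldl pvBlockStep (bl, cur, run)).2.2,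
                 (t.foldl pvBlockStep (bl, cur, run)).2.1)])
      = flatB bl ++ List.replicate run.toNat cur ++ scanMaxFrom cur t := by
  induction t with
  | nil => intro bl cur run _; simp [flatB, scanMaxFrom]
  | cons v s ih =>
    intro bl cur run hr
    simp only [List.foldl_cons, pvBlockStep]
    by_cases h1 : v > cur
    · simp only [if_pos h1]
      rw [ih _ _ _ (by omega)]
      have hmax : max cur v = v := max_eq_right (le_of_lt h1)
      simp only [scanMaxFrom, hmax]
      by_cases h2 : run ≠ 0
      · simp only [if_pos h2, flatB, List.flatMap_append]
        simp [List.append_assoc]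
      · simp only [if_neg h2]
        have : run = 0 := by omega
        subst this
        simp [List.append_assoc]
    · simp only [if_neg h1]
      rw [ih _ _ _ (by omega)]
      have hmax : max cur v = cur := max_eq_left (by omega)
      have : (run + 1).toNat = run.toNat + 1 := by omega
      simp only [scanMaxFrom, hmax, this, List.replicate_succ']
      simp [List.append_assoc]

theorem final_eq (nums : List Int) :
    ∀ (mxs : List Int) (s t : Int) (init : List Int),
    ((List.zip nums (scanAddFrom t mxs)).foldl pvOutStep (init, s)).1
      = init ++ scanAddFrom (s + t) (List.zipWith (· + ·) nums mxs) := by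
  induction nums with
  | nil => intro mxs s t init; simp [scanAddFrom]
  | cons v nv ih =>
    intro mxs s t init
    cases mxs with
    | nil => simp [scanAddFrom]
    | cons m mt =>
      simp only [scanAddFrom, List.zip_cons_cons, List.foldl_cons, pvOutStep, List.zipWith_cons_cons]
      rw [ih]
      have e1 : s + v + (t + m) = s + t + (v + m) := by ring
      have e2 : (s + v) + (t + m) = (s + t) + (v + m) := by ring
      simp [e1, List.append_assoc]

theorem foldl_scan_eq (nums : List Int) : ∀ (mx s : Int) (ans : List Int),
    (nums.foldl
      (fun (st : Int × Int × List Int) v =>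
        let m := max st.1 v
        let summ := st.2.1 + v + m
        (m, summ, st.2.2 ++ [summ]))
      (mx, s, ans)).2.2
    = ans ++ scanAddFrom s (List.zipWith (· + ·) nums (scanMaxFrom mx nums)) := by
  induction nums with
  | nil => simp [scanAddFrom]
  | cons v t ih =>
    intro mx s ans
    simp only [List.foldl_cons, scanMaxFrom, List.zipWith, scanAddFrom]
    rw [ih]
    have : s + v + max mx v = s + (v + max mx v) := by ring
    simp [this]

-- ===== VERDICT (by name: the statement is the Claim_ definition above) =====
theorem findPrefixScore_spec : Claim_equal_findPrefixScore := by
  intro nums _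
  unfold Spec_findPrefixScore
  have hA : findPrefixScore nums
      = scanAddFrom 0 (List.zipWith (· + ·) nums (scanMaxFrom 0 nums)) := by
    unfold findPrefixScore
    simpa using foldl_scan_eq nums 0 0 []
  have hnn := blocks_nonneg nums [] 0 0 (by simp) le_rfl
  have hblocks := blocks_flat nums [] 0 0 le_rfl
  have hall : ∀ p ∈ (nums.foldl pvBlockStep ([], 0, 0)).1
      ++ [((nums.foldl pvBlockStep ([], 0, 0)).2.2, (nums.foldl pvBlockStep ([], 0, 0)).2.1)],
      0 ≤ p.1 := by
    intro p hp
    rcases List.mem_append.1 hp with h | h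
    · exact hnn.1 p h
    · simp only [List.mem_singleton] at h
      subst h
      exact hnn.2
  have hB : findPrefixScore_alt nums
      = scanAddFrom 0 (List.zipWith (· + ·) nums (scanMaxFrom 0 nums)) := by
    unfold findPrefixScore_alt
    simp only []
    rw [expand_eq _ _ _ hall, hblocks]
    simp only [flatB, List.flatMap_nil, List.nil_append, Int.toNat_zero, List.replicate_zero]
    rw [final_eq nums (scanMaxFrom 0 nums) 0 0 []]
    simp
  rw [hA, hB]
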